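-- pv_equiv track=rewrite | github.com/Code-with-pratik-07/hackrx-insurance-api | app/services/semantic_search.py | _classify_clause_type
-- ===== SOURCE A (Python) =====
-- def _classify_clause_type(text: str) -> str:
--     """Classify clause type based on content"""
--     text_lower = text.lower()
--     if any(word in text_lower for word in ['exclusion', 'exclude', 'not covered']):
--         return 'exclusion'
--     elif any(word in text_lower for word in ['coverage', 'benefit', 'covered']):
--         return 'coverage'
--     elif any(word in text_lower for word in ['waiting period', 'wait']):
--         return 'waiting_period'
--     elif any(word in text_lower for word in ['claim', 'settlement']):
--         return 'claims'
--     else: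
--         return 'general'
-- ===== SOURCE B (Python) =====
-- # Single left-to-right scan: at each position record the best (lowest) priority
-- # of any keyword starting there; the label of the overall minimum priority wins.
-- KEYWORDS = [('exclusion', 0), ('exclude', 0), ('not covered', 0),
--             ('coverage', 1), ('benefit', 1), ('covered', 1),
--             ('waiting period', 2), ('wait', 2),
--             ('claim', 3), ('settlement', 3)]
-- LABELS = ['exclusion', 'coverage', 'waiting_period', 'claims', 'general']
--
--
-- def _classify_clause_type(text: str) -> str:
--     """Classify clause type based on content"""
--     t = text.lower()
--     best = 4
--     for i in range(len(t)):
--         for kw, p in KEYWORDS: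
--             if t.startswith(kw, i):
--                 best = min(best, p)
--     return LABELS[best]
-- ===== Notes on version B (the rewrite author's own statement) =====
-- stated objective: alternative
-- what changed: Instead of A's ordered elif chain of per-category substring tests, B makes a single left-to-right scan over the text, at each position taking the minimum priority of any keyword starting there, and maps the overall minimum priority to its label.
import Mathlib
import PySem

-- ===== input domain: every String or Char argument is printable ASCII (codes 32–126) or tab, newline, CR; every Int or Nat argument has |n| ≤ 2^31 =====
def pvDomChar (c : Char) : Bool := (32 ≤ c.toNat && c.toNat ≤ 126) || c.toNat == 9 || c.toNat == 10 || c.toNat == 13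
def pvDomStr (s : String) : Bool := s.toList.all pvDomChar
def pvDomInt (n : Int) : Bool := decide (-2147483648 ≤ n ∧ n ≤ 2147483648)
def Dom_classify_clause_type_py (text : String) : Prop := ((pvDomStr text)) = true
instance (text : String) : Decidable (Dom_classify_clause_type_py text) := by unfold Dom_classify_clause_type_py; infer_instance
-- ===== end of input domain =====

-- B replaces A's elif chain of substring tests by a single positional scan keeping the
-- minimum keyword priority seen; identical outputs (alternative decomposition, not faster).

-- ===== PORT A =====
def classify_clause_type_py (text : String) : String :=
  let text_lower := PySem.Str.lower text
  if ["exclusion", "exclude", "not covered"].any (fun word => PySem.Str.isIn word text_lower) then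
    "exclusion"
  else if ["coverage", "benefit", "covered"].any (fun word => PySem.Str.isIn word text_lower) then
    "coverage"
  else if ["waiting period", "wait"].any (fun word => PySem.Str.isIn word text_lower) then
    "waiting_period"
  else if ["claim", "settlement"].any (fun word => PySem.Str.isIn word text_lower) then
    "claims"
  else
    "general"

-- ===== PORT B =====
def pvKeywords : List (String × Nat) :=
  [("exclusion", 0), ("exclude", 0), ("not covered", 0),
   ("coverage", 1), ("benefit", 1), ("covered", 1),
   ("waiting period", 2), ("wait", 2),
   ("claim", 3), ("settlement", 3)]

def pvLabels : List String := ["exclusion", "coverage", "waiting_period", "claims", "general"]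

-- inner loop body: t.startswith(kw, i) for 0 ≤ i ≤ len(t) is exactly
-- kw.toList.isPrefixOf (t.drop i) (hand-port of startswith-at-index, exact there)
def pvInner (t : List Char) (i : Nat) (b : Nat) : Nat :=
  pvKeywords.foldl (fun b kp => if kp.1.toList.isPrefixOf (t.drop i) then min b kp.2 else b) b

-- outer loop: for i in range(len(t))
def pvBest (t : List Char) : Nat :=
  (List.range t.length).foldl (fun b i => pvInner t i b) 4

def classify_clause_type_py_alt (text : String) : String :=
  let t := PySem.Str.lower text
  pvLabels.getD (pvBest t.toList) ""

-- ===== PRECONDITION & SPEC =====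
def Spec_classify_clause_type_py (text : String) (out : String) : Prop := out = classify_clause_type_py_alt text
instance (text : String) (out : String) : Decidable (Spec_classify_clause_type_py text out) := by unfold Spec_classify_clause_type_py; infer_instance

-- ===== CLAIM =====
def Claim_equal_classify_clause_type_py : Prop := ∀ (text : String), Dom_classify_clause_type_py text → Spec_classify_clause_type_py text (classify_clause_type_py text)

-- ===== LEMMAS AND PROOFS =====

-- some keyword of priority k occurs in t
def pvPresent (t : List Char) (k : Nat) : Prop :=
  ∃ kp ∈ pvKeywords, kp.2 = k ∧ kp.1.toList <:+: t

-- generic facts about folds of shape (fun b x => if c x then min b (g x) else b)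
lemma condmin_le_init {α : Type} (c : α → Bool) (g : α → Nat) (l : List α) (b : Nat) :
    l.foldl (fun b x => if c x then min b (g x) else b) b ≤ b := by
  induction l generalizing b with
  | nil => simp
  | cons x xs ih =>
    simp only [List.foldl_cons]
    refine le_trans (ih _) ?_
    split <;> simp

lemma condmin_le_match {α : Type} (c : α → Bool) (g : α → Nat) (l : List α) (b : Nat)
    {x : α} (hmem : x ∈ l) (hc : c x = true) :
    l.foldl (fun b x => if c x then min b (g x) else b) b ≤ g x := by
  induction l generalizing b with
  | nil => cases hmem
  | cons y ys ih =>
    simp only [List.foldl_cons]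
    rcases List.mem_cons.mp hmem with h | h
    · subst h
      refine le_trans (condmin_le_init c g ys _) ?_
      simp [hc]
    · exact ih _ h

lemma condmin_attains {α : Type} (c : α → Bool) (g : α → Nat) (l : List α) (b : Nat) :
    l.foldl (fun b x => if c x then min b (g x) else b) b = b ∨
      ∃ x ∈ l, c x = true ∧ l.foldl (fun b x => if c x then min b (g x) else b) b = g x := by
  induction l generalizing b with
  | nil => left; rfl
  | cons y ys ih =>
    simp only [List.foldl_cons]
    rcases ih (if c y then min b (g y) else b) with h | ⟨x, hx, hc, he⟩
    · by_cases hcy : c y = true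
      · rw [h, if_pos hcy]
        rcases Nat.le_total b (g y) with hle | hle
        · left; exact Nat.min_eq_left hle
        · right; exact ⟨y, List.mem_cons_self .., hcy, Nat.min_eq_right hle⟩
      · left; rw [h, if_neg hcy]
    · right; exact ⟨x, List.mem_cons_of_mem _ hx, hc, he⟩

-- pvInner is such a fold
lemma pvInner_le_init (t : List Char) (i b : Nat) : pvInner t i b ≤ b :=
  condmin_le_init _ _ _ _

lemma pvInner_le_match (t : List Char) (i b : Nat) {kp : String × Nat}
    (hmem : kp ∈ pvKeywords) (hpre : kp.1.toList.isPrefixOf (t.drop i) = true) :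
    pvInner t i b ≤ kp.2 :=
  condmin_le_match (fun kp => kp.1.toList.isPrefixOf (t.drop i)) (fun kp => kp.2) pvKeywords b hmem hpre

lemma pvInner_attains (t : List Char) (i b : Nat) :
    pvInner t i b = b ∨ ∃ kp ∈ pvKeywords, kp.1.toList.isPrefixOf (t.drop i) = true ∧ pvInner t i b = kp.2 := by
  unfold pvInner
  exact condmin_attains (fun kp => kp.1.toList.isPrefixOf (t.drop i)) (fun kp => kp.2) pvKeywords b

-- outer fold over an arbitrary index list
lemma outer_le_init (t : List Char) (l : List Nat) (b : Nat) :
    l.foldl (fun b i => pvInner t i b) b ≤ b := by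
  induction l generalizing b with
  | nil => simp
  | cons i is ih => exact le_trans (ih _) (pvInner_le_init t i b)

lemma outer_le_match (t : List Char) (l : List Nat) (b : Nat) {i : Nat} {kp : String × Nat}
    (hi : i ∈ l) (hmem : kp ∈ pvKeywords) (hpre : kp.1.toList.isPrefixOf (t.drop i) = true) :
    l.foldl (fun b i => pvInner t i b) b ≤ kp.2 := by
  induction l generalizing b with
  | nil => cases hi
  | cons j js ih =>
    simp only [List.foldl_cons]
    rcases List.mem_cons.mp hi with h | h
    · subst h
      exact le_trans (outer_le_init t js _) (pvInner_le_match t _ b hmem hpre)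
    · exact ih _ h

lemma outer_attains (t : List Char) (l : List Nat) (b : Nat) :
    l.foldl (fun b i => pvInner t i b) b = b ∨
      ∃ i ∈ l, ∃ kp ∈ pvKeywords, kp.1.toList.isPrefixOf (t.drop i) = true ∧
        l.foldl (fun b i => pvInner t i b) b = kp.2 := by
  induction l generalizing b with
  | nil => left; rfl
  | cons j js ih =>
    simp only [List.foldl_cons]
    rcases ih (pvInner t j b) with h | ⟨i, hi, kp, hmem, hpre, he⟩
    · rcases pvInner_attains t j b with h2 | ⟨kp, hmem, hpre, h2⟩
      · left; rw [h, h2]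
      · right; exact ⟨j, List.mem_cons_self .., kp, hmem, hpre, by rw [h, h2]⟩
    · right; exact ⟨i, List.mem_cons_of_mem _ hi, kp, hmem, hpre, he⟩

-- occurrence as a bounded positional match (for nonempty keywords)
lemma infix_iff_match (kw t : List Char) (hne : kw ≠ []) :
    kw <:+: t ↔ ∃ i < t.length, kw.isPrefixOf (t.drop i) = true := by
  constructor
  · intro h
    have hin : PySem.Chars.isIn kw t = true := (PySem.Chars.isIn_iff_infix kw t).mpr h
    obtain ⟨j, hj⟩ := (PySem.Chars.exists_prefix_drop_iff_isIn kw t).mpr hin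
    refine ⟨j, ?_, List.isPrefixOf_iff_prefix.mpr hj⟩
    by_contra hlt
    rw [List.drop_eq_nil_of_le (Nat.le_of_not_lt hlt)] at hj
    exact hne (List.prefix_nil.mp hj)
  · rintro ⟨i, _, hp⟩
    exact (PySem.Chars.isIn_iff_infix kw t).mp
      ((PySem.Chars.exists_prefix_drop_iff_isIn kw t).mp ⟨i, List.isPrefixOf_iff_prefix.mp hp⟩)

lemma pvKeywords_ne_nil : ∀ kp ∈ pvKeywords, kp.1.toList ≠ [] := by decide
lemma pvKeywords_le3 : ∀ kp ∈ pvKeywords, kp.2 ≤ 3 := by decide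

lemma present_imp_best_le {t : List Char} {k : Nat} (h : pvPresent t k) : pvBest t ≤ k := by
  obtain ⟨kp, hmem, hk, hinf⟩ := h
  obtain ⟨i, hi, hp⟩ := (infix_iff_match _ t (pvKeywords_ne_nil kp hmem)).mp hinf
  have := outer_le_match t (List.range t.length) 4 (List.mem_range.mpr hi) hmem hp
  rw [hk] at this
  exact this

lemma best_attains (t : List Char) :
    pvBest t = 4 ∨ ∃ kp ∈ pvKeywords, kp.1.toList <:+: t ∧ pvBest t = kp.2 := by
  rcases outer_attains t (List.range t.length) 4 with h | ⟨i, hi, kp, hmem, hpre, he⟩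
  · left; exact h
  · right
    refine ⟨kp, hmem, ?_, he⟩
    exact (infix_iff_match _ t (pvKeywords_ne_nil kp hmem)).mpr ⟨i, List.mem_range.mp hi, hpre⟩

lemma best_present {t : List Char} {k : Nat} (hk : k ≤ 3) (h : pvBest t = k) : pvPresent t k := by
  rcases best_attains t with h4 | ⟨kp, hmem, hinf, he⟩
  · omega
  · exact ⟨kp, hmem, by omega, hinf⟩

lemma best_eq0 (t : List Char) (h0 : pvPresent t 0) : pvBest t = 0 :=
  Nat.le_zero.mp (present_imp_best_le h0)

lemma best_eq1 (t : List Char) (h0 : ¬ pvPresent t 0) (h1 : pvPresent t 1) : pvBest t = 1 := by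
  have hle := present_imp_best_le h1
  have hne : pvBest t ≠ 0 := fun h => h0 (best_present (by omega) h)
  omega

lemma best_eq2 (t : List Char) (h0 : ¬ pvPresent t 0) (h1 : ¬ pvPresent t 1)
    (h2 : pvPresent t 2) : pvBest t = 2 := by
  have hle := present_imp_best_le h2
  have n0 : pvBest t ≠ 0 := fun h => h0 (best_present (by omega) h)
  have n1 : pvBest t ≠ 1 := fun h => h1 (best_present (by omega) h)
  omega

lemma best_eq3 (t : List Char) (h0 : ¬ pvPresent t 0) (h1 : ¬ pvPresent t 1)
    (h2 : ¬ pvPresent t 2) (h3 : pvPresent t 3) : pvBest t = 3 := by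
  have hle := present_imp_best_le h3
  have n0 : pvBest t ≠ 0 := fun h => h0 (best_present (by omega) h)
  have n1 : pvBest t ≠ 1 := fun h => h1 (best_present (by omega) h)
  have n2 : pvBest t ≠ 2 := fun h => h2 (best_present (by omega) h)
  omega

lemma best_eq4 (t : List Char) (h0 : ¬ pvPresent t 0) (h1 : ¬ pvPresent t 1)
    (h2 : ¬ pvPresent t 2) (h3 : ¬ pvPresent t 3) : pvBest t = 4 := by
  rcases best_attains t with h | ⟨kp, hmem, hinf, he⟩
  · exact h
  · exfalso
    have hk3 := pvKeywords_le3 kp hmem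
    have hp : pvPresent t kp.2 := ⟨kp, hmem, rfl, hinf⟩
    rcases (by omega : kp.2 = 0 ∨ kp.2 = 1 ∨ kp.2 = 2 ∨ kp.2 = 3) with h' | h' | h' | h' <;>
      rw [h'] at hp
    · exact h0 hp
    · exact h1 hp
    · exact h2 hp
    · exact h3 hp

-- A's any-conditions match pvPresent
lemma cond_iff (s : String) (k : Nat) (ws : List String)
    (hws : ws = (pvKeywords.filter (fun kp => kp.2 = k)).map (·.1)) (hk : k ≤ 3) :
    (ws.any (fun word => PySem.Str.isIn word s)) = true ↔ pvPresent s.toList k := by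
  subst hws
  unfold pvPresent
  interval_cases k <;>
    simp [pvKeywords, PySem.Chars.isIn_iff_infix]

-- ===== VERDICT =====
theorem classify_clause_type_py_spec : Claim_equal_classify_clause_type_py := by
  intro text _
  unfold Spec_classify_clause_type_py classify_clause_type_py classify_clause_type_py_alt
  set s := PySem.Str.lower text with hs
  have h0 := cond_iff s 0 ["exclusion", "exclude", "not covered"] (by decide) (by omega)
  have h1 := cond_iff s 1 ["coverage", "benefit", "covered"] (by decide) (by omega)
  have h2 := cond_iff s 2 ["waiting period", "wait"] (by decide) (by omega)
  have h3 := cond_iff s 3 ["claim", "settlement"] (by decide) (by omega)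
  by_cases p0 : pvPresent s.toList 0
  · simp only [h0.mpr p0, best_eq0 s.toList p0]
    simp [pvLabels]
  · have c0 := Bool.eq_false_iff.mpr (fun h => p0 (h0.mp h))
    by_cases p1 : pvPresent s.toList 1
    · simp only [c0, h1.mpr p1, best_eq1 s.toList p0 p1]
      simp [pvLabels]
    · have c1 := Bool.eq_false_iff.mpr (fun h => p1 (h1.mp h))
      by_cases p2 : pvPresent s.toList 2
      · simp only [c0, c1, h2.mpr p2, best_eq2 s.toList p0 p1 p2]
        simp [pvLabels]
      · have c2 := Bool.eq_false_iff.mpr (fun h => p2 (h2.mp h))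
        by_cases p3 : pvPresent s.toList 3
        · simp only [c0, c1, c2, h3.mpr p3, best_eq3 s.toList p0 p1 p2 p3]
          simp [pvLabels]
        · have c3 := Bool.eq_false_iff.mpr (fun h => p3 (h3.mp h))
          simp only [c0, c1, c2, c3, best_eq4 s.toList p0 p1 p2 p3]
          simp [pvLabels]
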